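-- pv_equiv track=rewrite | github.com/Madfarm/matrix_manipulation_scripts | corpo-way/a.py | calculate_payout
-- ===== SOURCE A (Python) =====
-- def calculate_payout(temperatures):
--     total_payout = 0
--     for temperature in temperatures:
--         if temperature < 3500:
--             total_payout += 1000
--         elif 3500 <= temperature <= 5000:
--             total_payout += 2000
--         else:
--             total_payout += 3000
--     return total_payout
-- ===== SOURCE B (Python) =====
-- def calculate_payout(temperatures):
--     n = len(temperatures)
--     mid = sum(1 for t in temperatures if t >= 3500)
--     high = sum(1 for t in temperatures if t > 5000)
--     return 1000 * (n + mid + high)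
-- ===== Notes on version B (the rewrite author's own statement) =====
-- stated objective: alternative
-- what changed: Replaces the per-element branch-and-accumulate loop by a weighted sum of tier counts: total = 1000*(len + count(t>=3500) + count(t>5000)).
import Mathlib
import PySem

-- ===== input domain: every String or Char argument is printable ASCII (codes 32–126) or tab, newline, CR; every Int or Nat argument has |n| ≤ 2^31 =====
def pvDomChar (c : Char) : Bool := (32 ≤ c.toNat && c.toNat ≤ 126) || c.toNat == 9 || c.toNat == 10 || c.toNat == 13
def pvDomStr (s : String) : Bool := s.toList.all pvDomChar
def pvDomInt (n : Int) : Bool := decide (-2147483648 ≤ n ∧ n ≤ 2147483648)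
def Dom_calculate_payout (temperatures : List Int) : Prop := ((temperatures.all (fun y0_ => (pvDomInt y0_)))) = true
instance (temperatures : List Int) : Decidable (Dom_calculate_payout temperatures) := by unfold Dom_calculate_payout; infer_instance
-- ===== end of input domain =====

-- B computes the same payout as a weighted sum of tier counts instead of a per-element branching accumulator (alternative decomposition).


-- ===== PORT A =====
def calculate_payout (temperatures : List Int) : Int :=
  temperatures.foldl (fun total_payout temperature =>
    if temperature < 3500 then total_payout + 1000
    else if 3500 ≤ temperature ∧ temperature ≤ 5000 then total_payout + 2000
    else total_payout + 3000) 0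

-- ===== PORT B =====
def calculate_payout_alt (temperatures : List Int) : Int :=
  let n : Int := temperatures.length
  let mid : Int := (temperatures.filter (fun t => 3500 ≤ t)).length
  let high : Int := (temperatures.filter (fun t => 5000 < t)).length
  1000 * (n + mid + high)

-- ===== PRECONDITION & SPEC =====
def Spec_calculate_payout (temperatures : List Int) (out : Int) : Prop := out = calculate_payout_alt temperatures
instance (temperatures : List Int) (out : Int) : Decidable (Spec_calculate_payout temperatures out) := by unfold Spec_calculate_payout; infer_instance

-- ===== CLAIM (what is proved, stated in full; the proofs are below) =====
def Claim_equal_calculate_payout : Prop := ∀ (temperatures : List Int), Dom_calculate_payout temperatures → Spec_calculate_payout temperatures (calculate_payout temperatures)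

-- ===== LEMMAS AND PROOFS =====
lemma alt_cons (x : Int) (xs : List Int) :
    calculate_payout_alt (x :: xs) = calculate_payout_alt xs
      + (1000 + (if 3500 ≤ x then 1000 else 0) + (if 5000 < x then 1000 else 0)) := by
  simp only [calculate_payout_alt, List.filter_cons, decide_eq_true_eq, List.length_cons]
  split_ifs <;> push_cast [List.length_cons] <;> omega

lemma payout_foldl_shift (temperatures : List Int) (c : Int) :
    temperatures.foldl (fun total_payout temperature =>
      if temperature < 3500 then total_payout + 1000
      else if 3500 ≤ temperature ∧ temperature ≤ 5000 then total_payout + 2000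
      else total_payout + 3000) c
    = c + calculate_payout_alt temperatures := by
  induction temperatures generalizing c with
  | nil => simp [calculate_payout_alt]
  | cons h t ih =>
      simp only [List.foldl_cons]
      rw [ih, alt_cons]
      split_ifs <;> omega

-- ===== VERDICT (by name: the statement is the Claim_ definition above) =====
theorem calculate_payout_spec : Claim_equal_calculate_payout := by
  intro temperatures _
  unfold Spec_calculate_payout calculate_payout
  rw [payout_foldl_shift]
  omega
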